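-- pv_equiv track=rewrite | github.com/pypi-data/pypi-mirror-40 | packages/vkconnections/vkconnections-0.0.5.tar.gz/vkconnections-0.0.5/vkconnections/VkAPI.py | getVkScriptForExecute
-- ===== SOURCE A (Python) =====
-- import math
--
-- def getVkScriptForExecute(allTheFriends):
--     lenFriends = len(allTheFriends)
--     requestsCount = lenFriends // 25 + math.ceil((lenFriends - lenFriends // 25 * 25) / 25)
--     outputString = []
--     startIndex = 0
--     endIndex = 25
--     for number in range(0, requestsCount):
--         requestString = 'return [ '
--         for item in range(startIndex, endIndex):
--             if lenFriends > item:
--                 requestString += 'API.friends.get({"user_id": ' + str(allTheFriends[item]) + ' }), '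
--         requestString = requestString[0:-2]
--         requestString += ' ];'
--         outputString.append(requestString)
--         startIndex += 25
--         endIndex += 25
--     return outputString
-- ===== SOURCE B (Python) =====
-- def getVkScriptForExecute(allTheFriends):
--     out = []
--     for i in range(0, len(allTheFriends), 25):
--         chunk = allTheFriends[i:i + 25]
--         parts = ['API.friends.get({"user_id": ' + str(f) + ' })' for f in chunk]
--         out.append('return [ ' + ', '.join(parts) + ' ];')
--     return out
-- ===== Notes on version B (the rewrite author's own statement) =====
-- stated objective: simpler
-- what changed: Replaces the precomputed request count, the startIndex/endIndex counters, the per-item bounds check and the trailing-separator trim ([0:-2]) with direct iteration over chunk starts, slicing the chunk and assembling each request with a comprehension and ', '.join.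
import Mathlib
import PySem

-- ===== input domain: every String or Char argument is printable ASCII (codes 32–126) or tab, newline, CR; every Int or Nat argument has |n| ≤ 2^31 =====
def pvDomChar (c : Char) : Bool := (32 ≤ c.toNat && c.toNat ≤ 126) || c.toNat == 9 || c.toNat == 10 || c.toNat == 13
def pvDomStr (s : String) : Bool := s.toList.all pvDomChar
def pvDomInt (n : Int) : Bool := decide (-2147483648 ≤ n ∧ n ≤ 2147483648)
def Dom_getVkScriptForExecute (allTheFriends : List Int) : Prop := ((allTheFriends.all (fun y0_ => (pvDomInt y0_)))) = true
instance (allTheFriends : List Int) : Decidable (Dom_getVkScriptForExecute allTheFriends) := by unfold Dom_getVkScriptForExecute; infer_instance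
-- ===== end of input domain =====

-- B replaces A's request-count precomputation, index counters, per-item bounds check and
-- trailing-separator trim with direct chunk slicing and a ", ".join (objective: simpler).


-- ===== PORT A =====
-- math.ceil(x/25) (x a nonnegative integer here) is ported exactly as the integer ceiling -((-x) // 25)
def getVkScriptForExecute (allTheFriends : List Int) : List String :=
  let lenFriends : Int := PySem.List.len allTheFriends
  let requestsCount : Int := PySem.Int.floordiv lenFriends 25 +
    (-(PySem.Int.floordiv (-(lenFriends - PySem.Int.floordiv lenFriends 25 * 25)) 25))
  let st := (PySem.List.pyRange 0 requestsCount 1).foldl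
    (fun (st : List String × Int × Int) _number =>
      let requestString : String := (PySem.List.pyRange st.2.1 st.2.2 1).foldl
        (fun requestString item =>
          if lenFriends > item then
            requestString ++ "API.friends.get({\"user_id\": " ++
              PySem.Int.toStr (PySem.List.pyGetD allTheFriends item 0) ++ " }), "
          else requestString)
        "return [ "
      let requestString := PySem.Str.slice requestString (some 0) (some (-2))
      let requestString := requestString ++ " ];"
      (st.1 ++ [requestString], st.2.1 + 25, st.2.2 + 25))
    (([] : List String), (0 : Int), (25 : Int))
  st.1

-- ===== PORT B =====
def getVkScriptForExecute_alt (allTheFriends : List Int) : List String :=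
  (PySem.List.pyRange 0 (PySem.List.len allTheFriends) 25).map (fun i =>
    let chunk := PySem.List.slice allTheFriends (some i) (some (i + 25))
    let parts := chunk.map (fun f =>
      "API.friends.get({\"user_id\": " ++ PySem.Int.toStr f ++ " })")
    "return [ " ++ PySem.Str.join ", " parts ++ " ];")

-- ===== PRECONDITION & SPEC =====
def Spec_getVkScriptForExecute (allTheFriends : List Int) (out : List String) : Prop := out = getVkScriptForExecute_alt allTheFriends
instance (allTheFriends : List Int) (out : List String) : Decidable (Spec_getVkScriptForExecute allTheFriends out) := by unfold Spec_getVkScriptForExecute; infer_instance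

-- ===== CLAIM (what is proved, stated in full; the proofs are below) =====
def Claim_equal_getVkScriptForExecute : Prop := ∀ (allTheFriends : List Int), Dom_getVkScriptForExecute allTheFriends → Spec_getVkScriptForExecute allTheFriends (getVkScriptForExecute allTheFriends)

-- ===== LEMMAS AND PROOFS =====

-- the string A builds for the chunk starting at index s (proof-side abbreviation)
def pvRow (xs : List Int) (s : Int) : String :=
  PySem.Str.slice
    ((PySem.List.pyRange s (s + 25) 1).foldl
      (fun requestString item =>
        if (xs.length : Int) > item then
          requestString ++ "API.friends.get({\"user_id\": " ++
            PySem.Int.toStr (PySem.List.pyGetD xs item 0) ++ " }), "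
        else requestString)
      "return [ ") (some 0) (some (-2)) ++ " ];"

-- A's request count is ⌈n/25⌉
lemma pv_rc_eq (n : Nat) :
    PySem.Int.floordiv (n : Int) 25 +
      (-(PySem.Int.floordiv (-((n : Int) - PySem.Int.floordiv (n : Int) 25 * 25)) 25))
      = (((n + 24) / 25 : Nat) : Int) := by
  rw [PySem.Int.floordiv_eq_ediv_of_pos (by omega), PySem.Int.floordiv_eq_ediv_of_pos (by omega)]
  omega

-- A's outer loop unrolled: k iterations of chunk rows, starting at chunk start s
lemma pv_loopA (xs : List Int) (k : Nat) : ∀ (out : List String) (s : Int),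
    (PySem.List.pyRange 0 (k : Int) 1).foldl
      (fun (st : List String × Int × Int) _number =>
        (st.1 ++ [PySem.Str.slice
          ((PySem.List.pyRange st.2.1 st.2.2 1).foldl
            (fun requestString item =>
              if (xs.length : Int) > item then
                requestString ++ "API.friends.get({\"user_id\": " ++
                  PySem.Int.toStr (PySem.List.pyGetD xs item 0) ++ " }), "
              else requestString)
            "return [ ") (some 0) (some (-2)) ++ " ];"],
         st.2.1 + 25, st.2.2 + 25))
      (out, s, s + 25)
    = (out ++ (List.range k).map (fun j : Nat => pvRow xs (s + 25 * (j : Int))),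
       s + 25 * k, (s + 25 * k) + 25) := by
  induction k with
  | zero => intro out s; rw [PySem.List.pyRange_one_eq_nil (by omega)]; simp
  | succ k ih =>
    intro out s
    have hcast : ((k + 1 : Nat) : Int) = (k : Int) + 1 := by push_cast; ring
    rw [hcast, PySem.List.pyRange_one_succ_right (by positivity), List.foldl_append, ih]
    simp only [List.foldl_cons, List.foldl_nil, List.range_succ, pvRow, Prod.mk.injEq]
    refine ⟨?_, ?_, ?_⟩
    · simp [List.append_assoc]
    · ring
    · ring

-- an empty slice
lemma pv_slice_zero (xs : List Int) (a b : Int) (h0 : 0 ≤ b) (hb : b ≤ a) :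
    PySem.List.slice xs (some a) (some b) = [] := by
  rw [PySem.List.slice_toNat _ (le_trans h0 hb) h0]
  rw [show b.toNat - a.toNat = 0 by omega]
  simp

-- inner loop: the chars appended between indices a and a+k are exactly the sliced chunk's parts
lemma pv_inner (xs : List Int) (k : Nat) : ∀ (a : Int) (init : String), 0 ≤ a →
    ((PySem.List.pyRange a (a + k) 1).foldl
      (fun requestString item =>
        if (xs.length : Int) > item then
          requestString ++ "API.friends.get({\"user_id\": " ++
            PySem.Int.toStr (PySem.List.pyGetD xs item 0) ++ " }), "
        else requestString)
      init).toList
    = init.toList ++ ((PySem.List.slice xs (some a) (some (a + k))).map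
        (fun x => ("API.friends.get({\"user_id\": " ++ PySem.Int.toStr x ++ " }), ").toList)).flatten := by
  induction k with
  | zero =>
    intro a init h0
    rw [show a + (0:Nat) = a by push_cast; ring, PySem.List.pyRange_one_eq_nil (by omega)]
    rw [pv_slice_zero xs a a h0 le_rfl]
    simp
  | succ k ih =>
    intro a init h0
    have hlt : a < a + (k + 1 : Nat) := by push_cast; omega
    rw [PySem.List.pyRange_one_cons hlt, List.foldl_cons]
    have hshift : a + ((k + 1 : Nat) : Int) = (a + 1) + (k : Nat) := by push_cast; ring
    by_cases hna : a < (xs.length : Int)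
    · rw [if_pos hna]
      rw [hshift, ih (a + 1) _ (by omega)]
      have hget : PySem.List.pyGetD xs a 0 = xs[a.toNat] :=
        PySem.List.pyGetD_eq_getElem xs 0 h0 hna
      have hsl : PySem.List.slice xs (some a) (some ((a+1) + (k : Nat))) =
          xs[a.toNat] :: PySem.List.slice xs (some (a+1)) (some ((a+1) + (k : Nat))) := by
        rw [PySem.List.slice_toNat _ h0 (by omega), PySem.List.slice_toNat _ (by omega) (by omega)]
        have h1 : a.toNat < xs.length := by omega
        rw [List.drop_eq_getElem_cons h1]
        have h2 : ((a + 1) + (k:Nat)).toNat - a.toNat = k + 1 := by omega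
        have h3 : ((a + 1) + (k:Nat)).toNat - (a+1).toNat = k := by omega
        have h4 : (a+1).toNat = a.toNat + 1 := by omega
        rw [h2, h3, h4, List.take_succ_cons]
      rw [hsl]
      simp [hget]
    · rw [if_neg hna]
      rw [hshift, ih (a + 1) _ (by omega)]
      have hd : ∀ (c : Int), (xs.length : Int) ≤ c → 0 ≤ c → ∀ b, 0 ≤ b →
          PySem.List.slice xs (some c) (some b) = [] := by
        intro c hc hc0 b hb0
        rcases le_or_gt b c with hbc | hbc
        · exact pv_slice_zero xs c b hb0 hbc
        · rw [PySem.List.slice_toNat _ hc0 (by omega)]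
          rw [List.drop_eq_nil_of_le (by omega)]
          simp
      rw [hd a (by omega) h0 _ (by omega), hd (a+1) (by omega) (by omega) _ (by omega)]

-- joining parts that each end in the separator is the join plus one trailing separator
lemma pv_join_gen (sep : List Char) : ∀ (ps : List (List Char)), ps ≠ [] →
    (ps.map (· ++ sep)).flatten = PySem.Chars.join sep ps ++ sep := by
  intro ps h
  induction ps with
  | nil => exact absurd rfl h
  | cons p rest ih =>
    cases rest with
    | nil => simp [PySem.Chars.join_singleton]
    | cons q t =>
      rw [List.map_cons, List.flatten_cons, ih (by simp), PySem.Chars.join_cons_cons]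
      simp [List.append_assoc]

lemma pv_join (chunk : List Int) (h : chunk ≠ []) :
    (chunk.map (fun x => ("API.friends.get({\"user_id\": " ++ PySem.Int.toStr x ++ " }), ").toList)).flatten
    = PySem.Chars.join (", ".toList)
        ((chunk.map (fun f => "API.friends.get({\"user_id\": " ++ PySem.Int.toStr f ++ " })")).map String.toList)
      ++ ", ".toList := by
  have hmap : chunk.map (fun x => ("API.friends.get({\"user_id\": " ++ PySem.Int.toStr x ++ " }), ").toList)
      = ((chunk.map (fun f => "API.friends.get({\"user_id\": " ++ PySem.Int.toStr f ++ " })")).map String.toList).map (· ++ ", ".toList) := by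
    simp only [List.map_map]
    apply List.map_congr_left
    intro x _
    simp only [Function.comp, String.toList_append, List.append_assoc]
    congr 2
  rw [hmap, pv_join_gen _ _ (by simp [h])]

-- A's chunk string equals B's chunk string, for a chunk start strictly below the length
lemma pv_row_eq (xs : List Int) (s : Int) (h0 : 0 ≤ s) (hn : s < (xs.length : Int)) :
    pvRow xs s = "return [ " ++
      PySem.Str.join ", " ((PySem.List.slice xs (some s) (some (s + 25))).map (fun f =>
        "API.friends.get({\"user_id\": " ++ PySem.Int.toStr f ++ " })")) ++ " ];" := by
  apply String.toList_inj.mp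
  have h25 : s + (25:Int) = s + ((25:Nat):Int) := by norm_num
  have hchunk : PySem.List.slice xs (some s) (some (s + 25)) ≠ [] := by
    rw [PySem.List.slice_toNat _ h0 (by omega)]
    apply List.ne_nil_of_length_pos
    rw [List.length_take, List.length_drop]
    omega
  rw [pvRow, String.toList_append, PySem.Str.toList_slice, PySem.Chars.slice_eq_listSlice]
  rw [h25, pv_inner xs 25 s "return [ " h0, ← h25, pv_join _ hchunk]
  rw [PySem.List.slice_zero_start]
  rw [show "return [ ".toList ++
        (PySem.Chars.join (", ".toList)
          ((List.map (fun f => "API.friends.get({\"user_id\": " ++ PySem.Int.toStr f ++ " })")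
            (PySem.List.slice xs (some s) (some (s + 25)))).map String.toList) ++ ", ".toList)
      = ("return [ ".toList ++
        PySem.Chars.join (", ".toList)
          ((List.map (fun f => "API.friends.get({\"user_id\": " ++ PySem.Int.toStr f ++ " })")
            (PySem.List.slice xs (some s) (some (s + 25)))).map String.toList)) ++ ", ".toList
      from by simp]
  rw [PySem.List.slice_to_neg_ofNat _ 2 (by omega)]
  rw [List.length_append]
  rw [show ", ".toList.length = 2 from rfl]
  rw [Nat.add_sub_cancel, List.take_left' rfl]
  simp [String.toList_append, PySem.Str.toList_join]

lemma pv_main (xs : List Int) : getVkScriptForExecute xs = getVkScriptForExecute_alt xs := by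
  have hA : getVkScriptForExecute xs
      = (List.range ((xs.length + 24) / 25)).map (fun j : Nat => pvRow xs ((0:Int) + 25 * (j : Int))) := by
    simp only [getVkScriptForExecute, PySem.List.len_eq]
    rw [pv_rc_eq xs.length]
    refine Eq.trans (congrArg Prod.fst (pv_loopA xs ((xs.length + 24) / 25) [] 0)) ?_
    simp
  rw [hA]
  simp only [getVkScriptForExecute_alt, PySem.List.len_eq]
  rw [PySem.List.pyRange_of_pos 0 (xs.length : Int) (by omega)]
  rw [show (if (0:Int) < (xs.length:Int) then (((xs.length:Int) - 0 + 25 - 1) / 25).toNat else 0)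
      = (xs.length + 24) / 25 from by split_ifs with h <;> omega]
  rw [List.map_map]
  apply List.map_congr_left
  intro j hj
  have hj' : j < (xs.length + 24) / 25 := List.mem_range.mp hj
  have hlt : (0:Int) + 25 * (j : Int) < (xs.length : Int) := by
    have : 25 * j < xs.length := by omega
    omega
  rw [pv_row_eq xs ((0:Int) + 25 * (j : Int)) (by positivity) hlt]
  simp [Function.comp]

-- ===== VERDICT (by name: the statement is the Claim_ definition above) =====
theorem getVkScriptForExecute_spec : Claim_equal_getVkScriptForExecute := by
  intro xs _
  unfold Spec_getVkScriptForExecute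
  exact pv_main xs
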